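-- pv_equiv track=rewrite | github.com/syt06162/Algorithm-Study | programmers/level 3/30_68646_MR.py | solution
-- ===== SOURCE A (Python) =====
-- def solution(arr):
--     N = len(arr)
--     result = N
--
--     hasLeft = [0 for i in range(N)]
--     hasRight = [0 for i in range(N)]
--
--     # left 부터 갱신
--     minVal = arr[0]
--     for i in range(1,N):
--         if arr[i] < minVal:
--             minVal = arr[i]
--         else:
--             hasLeft[i] = 1
--
--     minVal = arr[N-1]
--     for i in range(N-2, -1, -1):
--         if arr[i] < minVal:
--             minVal = arr[i]
--         else:
--             hasRight[i] = 1
--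
--     # 안되는거 빼기 - 양쪽에 본인보다 작은 수
--     for i in range(N):
--         if hasLeft[i] + hasRight[i] == 2:
--             result -= 1
--     return result
-- ===== SOURCE B (Python) =====
-- def solution(arr):
--     # Direct definition-based check, no running-minimum state and no flag arrays:
--     # index i survives iff every element strictly before it, or every element
--     # strictly after it, is strictly greater than arr[i].
--     n = len(arr)
--     return sum(1 for i in range(n)
--                if all(arr[j] > arr[i] for j in range(i))
--                or all(arr[j] > arr[i] for j in range(i + 1, n)))
-- ===== Notes on version B (the rewrite author's own statement) =====
-- stated objective: simpler
-- what changed: B drops A's two running-minimum scans, flag arrays and subtraction pass entirely and instead counts, by the survivor definition itself, the indices whose left neighbourhood or right neighbourhood consists only of strictly greater elements (nested scans, no incremental state).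
import Mathlib
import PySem

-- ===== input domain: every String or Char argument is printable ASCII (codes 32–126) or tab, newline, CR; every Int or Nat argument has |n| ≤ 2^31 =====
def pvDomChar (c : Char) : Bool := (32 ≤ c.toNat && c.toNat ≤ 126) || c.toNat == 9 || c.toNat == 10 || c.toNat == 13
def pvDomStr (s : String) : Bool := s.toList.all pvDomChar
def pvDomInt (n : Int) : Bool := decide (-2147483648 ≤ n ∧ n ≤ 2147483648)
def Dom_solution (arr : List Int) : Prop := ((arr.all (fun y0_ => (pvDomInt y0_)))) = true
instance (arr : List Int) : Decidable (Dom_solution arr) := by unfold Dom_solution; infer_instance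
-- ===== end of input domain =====

-- B drops A's running-minimum scans, flag arrays and subtraction pass and instead counts, directly
-- by the survivor definition, the indices whose left or right neighbourhood is entirely strictly
-- greater (nested short-circuiting scans, no incremental state); alternative decomposition, not faster.

-- ===== PORT A =====
-- shared body of A's two symmetric update loops ('if arr[i] < minVal: minVal = arr[i] else: has[i] = 1');
-- indices produced by the ranges are always in range under Pre_ (arr ≠ []), so pyGetD/pySetD are exact here
def stepA (arr : List Int) (st : Int × List Int) (i : Int) : Int × List Int :=
  if PySem.List.pyGetD arr i 0 < st.1 then (PySem.List.pyGetD arr i 0, st.2)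
  else (st.1, PySem.List.pySetD st.2 i 1)

def solution (arr : List Int) : Int :=
  let N : Int := arr.length
  let result : Int := N
  let hasLeft : List Int := (PySem.List.pyRange 0 N 1).map (fun _ => 0)
  let hasRight : List Int := (PySem.List.pyRange 0 N 1).map (fun _ => 0)
  let minVal : Int := PySem.List.pyGetD arr 0 0        -- first element; the IndexError case is excluded by Pre_
  let s1 : Int × List Int := (PySem.List.pyRange 1 N 1).foldl (stepA arr) (minVal, hasLeft)
  let minVal2 : Int := PySem.List.pyGetD arr (N - 1) 0
  let s2 : Int × List Int := (PySem.List.pyRange (N - 2) (-1) (-1)).foldl (stepA arr) (minVal2, hasRight)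
  (PySem.List.pyRange 0 N 1).foldl
    (fun r i => if PySem.List.pyGetD s1.2 i 0 + PySem.List.pyGetD s2.2 i 0 = 2 then r - 1 else r)
    result

-- ===== PORT B =====
-- all indices drawn from the ranges are in range, so pyGetD is exact here
def solution_alt (arr : List Int) : Int :=
  let n : Int := arr.length
  (((PySem.List.pyRange 0 n 1).countP (fun i =>
      (PySem.List.pyRange 0 i 1).all
        (fun j => decide (PySem.List.pyGetD arr j 0 > PySem.List.pyGetD arr i 0))
      || (PySem.List.pyRange (i + 1) n 1).all
        (fun j => decide (PySem.List.pyGetD arr j 0 > PySem.List.pyGetD arr i 0)))) : Int)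

-- ===== PRECONDITION & SPEC =====
-- Python A reads the first element unconditionally, so it raises IndexError exactly on the empty list; excluded here.
def Pre_solution (arr : List Int) : Prop := arr ≠ []
instance (arr : List Int) : Decidable (Pre_solution arr) := by unfold Pre_solution; infer_instance
def pvWitness_solution : List Int := [3, 1, 2]

def Spec_solution (arr : List Int) (out : Int) : Prop := out = solution_alt arr
instance (arr : List Int) (out : Int) : Decidable (Spec_solution arr out) := by unfold Spec_solution; infer_instance

-- ===== CLAIM (what is proved, stated in full; the proofs are below) =====
def Claim_equal_solution : Prop := ∀ (arr : List Int), Dom_solution arr → Pre_solution arr → Spec_solution arr (solution arr)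

-- ===== LEMMAS AND PROOFS =====

-- left-to-right record flags: flagsL m l has a 0 where the element is strictly below the running minimum
def flagsL (m : Int) : List Int → List Int
  | [] => []
  | x :: t => (if x < m then 0 else 1) :: flagsL (min m x) t

-- A's per-index 0/1 "both sides fail" indicator (the value A's third loop subtracts)
def aBad (arr : List Int) (j : Nat) : Int :=
  if ((0:Int) :: flagsL (arr.getD 0 0) (arr.drop 1)).getD j 0
      + ((flagsL (arr.getD (arr.length - 1) 0) ((arr.take (arr.length - 1)).reverse)).reverse
          ++ [(0:Int)]).getD j 0 = 2
  then 1 else 0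

-- B's per-index 0/1 "survives" indicator (the summand of B's count)
def bGood (arr : List Int) (j : Nat) : Int :=
  if ((PySem.List.pyRange 0 (j:Int) 1).all
        (fun k => decide (PySem.List.pyGetD arr k 0 > PySem.List.pyGetD arr (j:Int) 0))
      || (PySem.List.pyRange ((j:Int) + 1) ((arr.length : Int)) 1).all
        (fun k => decide (PySem.List.pyGetD arr k 0 > PySem.List.pyGetD arr (j:Int) 0)))
  then 1 else 0

lemma flagsL_length (m : Int) (l : List Int) : (flagsL m l).length = l.length := by
  induction l generalizing m with
  | nil => rfl
  | cons x t ih => simp [flagsL, ih]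

lemma flagsL_getD (l : List Int) : ∀ (m : Int) (k : Nat), k < l.length →
    (flagsL m l).getD k 0 = if l.getD k 0 < (l.take k).foldl min m then 0 else 1 := by
  induction l with
  | nil => intro m k h; simp at h
  | cons x t ih =>
    intro m k h
    cases k with
    | zero => simp [flagsL]
    | succ k =>
      simp only [flagsL, List.getD_cons_succ, List.take_succ_cons, List.foldl_cons]
      exact ih (min m x) k (by simpa using h)

lemma fold_sub {α : Type} (p : α → Prop) [DecidablePred p] :
    ∀ (l : List α) (init : Int),
    l.foldl (fun r i => if p i then r - 1 else r) init
      = init - (l.map (fun i => if p i then (1 : Int) else 0)).sum := by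
  intro l
  induction l with
  | nil => simp
  | cons x t ih =>
    intro init
    simp only [List.foldl_cons, List.map_cons, List.sum_cons, ih]
    split_ifs <;> ring

lemma leftLoop (arr : List Int) : ∀ (t : List Int) (k : Nat) (m : Int) (pre : List Int),
    pre.length = k → arr.drop k = t →
    (PySem.List.pyRange (k : Int) (arr.length : Int) 1).foldl (stepA arr)
        (m, pre ++ List.replicate t.length 0)
      = (t.foldl min m, pre ++ flagsL m t) := by
  intro t
  induction t with
  | nil =>
    intro k m pre hpre hdrop
    have hk : arr.length ≤ k := List.drop_eq_nil_iff.mp hdrop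
    rw [PySem.List.pyRange_one_eq_nil (by exact_mod_cast hk)]
    simp [flagsL]
  | cons x t ih =>
    intro k m pre hpre hdrop
    have hk : k < arr.length := by
      by_contra h
      rw [List.drop_eq_nil_iff.mpr (by omega)] at hdrop; simp at hdrop
    have hx : arr[k] = x := by
      have := List.getElem_cons_drop hk
      rw [hdrop] at this
      exact (List.cons_eq_cons.mp this.symm).1.symm
    have hdrop' : arr.drop (k + 1) = t := by
      have := List.getElem_cons_drop hk
      rw [hdrop] at this
      exact (List.cons_eq_cons.mp this.symm).2.symm
    rw [PySem.List.pyRange_one_cons (by exact_mod_cast hk)]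
    rw [List.foldl_cons]
    have hget : PySem.List.pyGetD arr (k : Int) 0 = x := by
      rw [PySem.List.pyGetD_natCast, List.getD_eq_getElem _ _ hk, hx]
    have hstep : stepA arr (m, pre ++ List.replicate (x :: t).length 0) (k : Int)
        = (min m x, (pre ++ [if x < m then (0:Int) else 1]) ++ List.replicate t.length 0) := by
      unfold stepA
      rw [hget]
      have hrep : pre ++ List.replicate (x :: t).length (0:Int)
          = (pre ++ [(0:Int)]) ++ List.replicate t.length 0 := by
        simp [List.replicate_succ]
      split_ifs with hlt
      · rw [min_eq_right (le_of_lt hlt), hrep]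
      · have hset : PySem.List.pySetD (pre ++ List.replicate (x :: t).length (0:Int)) (k : Int) 1
            = (pre ++ [(1:Int)]) ++ List.replicate t.length 0 := by
          rw [PySem.List.pySetD_of_nonneg _ _ (by positivity)]
          rw [hrep]
          have : ((k : Int)).toNat = pre.length := by omega
          rw [this]
          simp [List.append_assoc]
        rw [hset, min_eq_left (by omega)]
    rw [hstep]
    have hcast : ((k : Int) + 1) = ((k + 1 : Nat) : Int) := by push_cast; ring
    rw [hcast, ih (k + 1) (min m x) (pre ++ [if x < m then (0:Int) else 1]) (by simp [hpre]) hdrop']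
    simp [flagsL, List.append_assoc]

lemma rightLoop (arr : List Int) : ∀ (k : Nat) (m : Int) (suf : List Int),
    k ≤ arr.length →
    (PySem.List.pyRange ((k : Int) - 1) (-1) (-1)).foldl (stepA arr)
        (m, List.replicate k 0 ++ suf)
      = (((arr.take k).reverse).foldl min m, (flagsL m ((arr.take k).reverse)).reverse ++ suf) := by
  intro k
  induction k with
  | zero =>
    intro m suf _
    rw [PySem.List.pyRange_neg_one_eq_nil (by norm_num)]
    simp [flagsL]
  | succ k ih =>
    intro m suf hk
    have hlt : k < arr.length := by omega
    have h1 : ((k + 1 : Nat) : Int) - 1 = (k : Nat) := by push_cast; ring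
    rw [h1, PySem.List.pyRange_neg_one_cons (by omega)]
    rw [List.foldl_cons]
    have hget : PySem.List.pyGetD arr (k : Int) 0 = arr[k] := by
      rw [PySem.List.pyGetD_natCast, List.getD_eq_getElem _ _ hlt]
    have hrep : List.replicate (k + 1) (0:Int) ++ suf = List.replicate k 0 ++ ((0:Int) :: suf) := by
      simp [List.replicate_succ', List.append_assoc]
    have hstep : stepA arr (m, List.replicate (k + 1) 0 ++ suf) (k : Int)
        = (min m arr[k], List.replicate k 0 ++ ((if arr[k] < m then (0:Int) else 1) :: suf)) := by
      unfold stepA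
      rw [hget]
      split_ifs with hlt2
      · rw [min_eq_right (le_of_lt hlt2), hrep]
      · rw [min_eq_left (by omega)]
        rw [PySem.List.pySetD_of_nonneg _ _ (by positivity), hrep]
        have : ((k : Int)).toNat = (List.replicate k (0:Int)).length := by simp
        rw [this]
        simp
    rw [hstep, ih (min m arr[k]) ((if arr[k] < m then (0:Int) else 1) :: suf) (by omega)]
    have htake : arr.take (k + 1) = arr.take k ++ [arr[k]] := by
      rw [List.take_add_one, List.getElem?_eq_getElem hlt]; rfl
    rw [htake, List.reverse_append]
    simp only [List.reverse_singleton, List.singleton_append, List.foldl_cons,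
      List.reverse_cons, List.append_assoc]
    simp [flagsL]

-- x is below a foldl-min iff it is below the seed and below every element
lemma lt_foldl_min (l : List Int) : ∀ (m x : Int),
    x < l.foldl min m ↔ x < m ∧ ∀ y ∈ l, x < y := by
  induction l with
  | nil => simp
  | cons a t ih => intro m x; simp [List.foldl_cons, ih, and_assoc]

-- "every element of arr at an index in [b, a) is above x", as a membership statement over (arr.take a).drop b
lemma forall_drop_take_iff (arr : List Int) (a b : Nat) (ha : a ≤ arr.length) (x : Int) :
    (∀ y ∈ (arr.take a).drop b, x < y) ↔ ∀ k : Nat, b ≤ k → k < a → x < arr.getD k 0 := by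
  constructor
  · intro h k hbk hka
    have hk : k < arr.length := by omega
    have hlen : k - b < ((arr.take a).drop b).length := by simp; omega
    have hmem : ((arr.take a).drop b)[k - b] ∈ (arr.take a).drop b := List.getElem_mem hlen
    have hval : ((arr.take a).drop b)[k - b] = arr[k] := by
      rw [List.getElem_drop, List.getElem_take]
      congr 1; omega
    rw [List.getD_eq_getElem _ _ hk]
    exact hval ▸ h _ hmem
  · intro h y hy
    obtain ⟨m, hm, rfl⟩ := List.mem_iff_getElem.mp hy
    have hmlen : b + m < a := by simp at hm; omega
    have hk : b + m < arr.length := by omega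
    have hval : ((arr.take a).drop b)[m] = arr[b + m] := by
      rw [List.getElem_drop, List.getElem_take]
    rw [hval, ← List.getD_eq_getElem _ 0 hk]
    exact h (b + m) (by omega) hmlen

-- B's left all-scan at index j ≥ 1 is exactly "arr[j] below the prefix minimum" (A's left flag test)
lemma allL_iff (arr : List Int) (j : Nat) (hj1 : 1 ≤ j) (hj : j < arr.length) :
    ((PySem.List.pyRange 0 (j:Int) 1).all
        (fun k => decide (PySem.List.pyGetD arr k 0 > PySem.List.pyGetD arr (j:Int) 0)) = true)
      ↔ arr.getD j 0 < (arr.take j).foldl min (arr.getD 0 0) := by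
  rw [List.all_eq_true, lt_foldl_min]
  have hfa : ∀ k : Int, k ∈ PySem.List.pyRange 0 (j:Int) 1 ↔ 0 ≤ k ∧ k < (j:Int) := by
    intro k; exact PySem.List.mem_pyRange_one
  constructor
  · intro h
    have key : ∀ k : Nat, k < j → arr.getD j 0 < arr.getD k 0 := by
      intro k hk
      have := h (k : Int) ((hfa _).mpr ⟨by positivity, by exact_mod_cast hk⟩)
      simp only [decide_eq_true_eq, gt_iff_lt, PySem.List.pyGetD_natCast] at this
      exact this
    refine ⟨key 0 (by omega), ?_⟩
    intro y hy
    exact (forall_drop_take_iff arr j 0 (by omega) _).mpr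
      (fun k _ hk => key k hk) y (by simpa using hy)
  · intro ⟨h0, hall⟩ k hk
    obtain ⟨hk0, hkj⟩ := (hfa k).mp hk
    have hkn : k.toNat < j := by omega
    simp only [decide_eq_true_eq, gt_iff_lt, PySem.List.pyGetD_natCast,
      PySem.List.pyGetD_of_nonneg arr 0 hk0]
    exact (forall_drop_take_iff arr j 0 (by omega) _).mp (by simpa using hall) k.toNat
      (by omega) hkn

-- B's right all-scan at index j < n-1 is exactly "arr[j] below the suffix minimum" (A's right flag test)
lemma allR_iff (arr : List Int) (j : Nat) (hj : j < arr.length - 1) :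
    ((PySem.List.pyRange ((j:Int) + 1) ((arr.length : Int)) 1).all
        (fun k => decide (PySem.List.pyGetD arr k 0 > PySem.List.pyGetD arr (j:Int) 0)) = true)
      ↔ arr.getD j 0 < (((arr.take (arr.length - 1)).drop (j + 1)).reverse).foldl min
          (arr.getD (arr.length - 1) 0) := by
  rw [List.all_eq_true, lt_foldl_min]
  have hmem : ∀ y, y ∈ ((arr.take (arr.length - 1)).drop (j + 1)).reverse
      ↔ y ∈ (arr.take (arr.length - 1)).drop (j + 1) := fun y => List.mem_reverse
  constructor
  · intro h
    have key : ∀ k : Nat, j + 1 ≤ k → k < arr.length → arr.getD j 0 < arr.getD k 0 := by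
      intro k hk1 hk2
      have := h (k : Int) (PySem.List.mem_pyRange_one.mpr ⟨by exact_mod_cast hk1, by exact_mod_cast hk2⟩)
      simp only [decide_eq_true_eq, gt_iff_lt, PySem.List.pyGetD_natCast] at this
      exact this
    refine ⟨key (arr.length - 1) (by omega) (by omega), ?_⟩
    intro y hy
    rw [hmem] at hy
    exact (forall_drop_take_iff arr (arr.length - 1) (j + 1) (by omega) _).mpr
      (fun k hk1 _ => key k hk1 (by omega)) y hy
  · intro ⟨hlast, hall⟩ k hk
    obtain ⟨hk1, hk2⟩ := PySem.List.mem_pyRange_one.mp hk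
    have hk0 : 0 ≤ k := by omega
    simp only [decide_eq_true_eq, gt_iff_lt, PySem.List.pyGetD_natCast,
      PySem.List.pyGetD_of_nonneg arr 0 hk0]
    by_cases hend : k.toNat = arr.length - 1
    · rw [hend]; exact hlast
    · have := (forall_drop_take_iff arr (arr.length - 1) (j + 1) (by omega) _).mp
        (fun y hy => hall y ((hmem y).mpr hy)) k.toNat (by omega) (by omega)
      exact this

-- per-index complementarity: A's "both sides fail" and B's "some side survives" sum to 1
lemma pointwise (arr : List Int) (hne : arr ≠ []) (j : Nat) (hj : j < arr.length) :
    aBad arr j + bGood arr j = 1 := by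
  have hN : 1 ≤ arr.length := List.length_pos_iff.mpr hne
  have hql : ((arr.take (arr.length - 1)).reverse).length = arr.length - 1 := by simp
  have hfl : (flagsL (arr.getD (arr.length - 1) 0) ((arr.take (arr.length - 1)).reverse)).length = arr.length - 1 := by
    rw [flagsL_length, hql]
  -- the left flag value
  have hLV : j ≠ 0 → ((0:Int) :: flagsL (arr.getD 0 0) (arr.drop 1)).getD j 0
      = if arr.getD j 0 < (arr.take j).foldl min (arr.getD 0 0) then 0 else 1 := by
    intro hj0
    obtain ⟨k, rfl⟩ : ∃ k, j = k + 1 := ⟨j - 1, by omega⟩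
    rw [List.getD_cons_succ, flagsL_getD _ _ _ (by simp; omega)]
    have h1 : (arr.drop 1).getD k 0 = arr.getD (k + 1) 0 := by
      rw [List.getD_eq_getElem _ _ (by simp; omega), List.getD_eq_getElem _ _ (by omega),
        List.getElem_drop]
      congr 1; omega
    have h2 : arr.take (k + 1) = arr.take 1 ++ (arr.drop 1).take k := by
      rw [← List.take_add]; congr 1; omega
    have h3 : arr.take 1 = [(arr.getD 0 0)] := by
      cases arr with
      | nil => exact absurd rfl hne
      | cons a t => simp
    rw [h1, h2, h3]
    simp [min_self]
  -- the right flag value, for j < length - 1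
  have hRV : j < arr.length - 1 →
      ((flagsL (arr.getD (arr.length - 1) 0) ((arr.take (arr.length - 1)).reverse)).reverse ++ [(0:Int)]).getD j 0
      = if arr.getD j 0 < (((arr.take (arr.length - 1)).drop (j + 1)).reverse).foldl min (arr.getD (arr.length - 1) 0)
        then 0 else 1 := by
    intro hjm
    rw [List.getD_append _ _ _ _ (by rw [List.length_reverse, hfl]; omega)]
    rw [List.getD_eq_getElem _ _ (by rw [List.length_reverse, hfl]; omega), List.getElem_reverse,
      ← List.getD_eq_getElem _ 0 (by rw [hfl] at *; omega)]
    rw [flagsL_getD _ _ _ (by rw [hfl, hql]; omega), hfl]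
    have hq1 : ((arr.take (arr.length - 1)).reverse).getD (arr.length - 1 - 1 - j) 0
        = arr.getD j 0 := by
      rw [List.getD_eq_getElem _ _ (by rw [hql]; omega), List.getElem_reverse,
        List.getD_eq_getElem _ _ (by omega)]
      rw [List.getElem_take]
      congr 1
      simp [List.length_take]
      omega
    have hq2 : ((arr.take (arr.length - 1)).reverse).take (arr.length - 1 - 1 - j)
        = ((arr.take (arr.length - 1)).drop (j + 1)).reverse := by
      rw [List.take_reverse]
      congr 2
      simp
      omega
    rw [hq1, hq2]
  by_cases hjN : j = arr.length - 1
  · -- last index: right flag 0 and B's right scan range empty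
    have hR0 : ((flagsL (arr.getD (arr.length - 1) 0) ((arr.take (arr.length - 1)).reverse)).reverse ++ [(0:Int)]).getD j 0
        = 0 := by
      rw [List.getD_append_right _ _ _ _ (by rw [List.length_reverse, hfl]; omega)]
      rw [List.length_reverse, hfl]
      have : j - (arr.length - 1) = 0 := by omega
      rw [this]
      rfl
    have hBR : PySem.List.pyRange ((j:Int) + 1) ((arr.length : Int)) 1 = [] :=
      PySem.List.pyRange_one_eq_nil (by omega)
    unfold aBad bGood
    rw [hR0, hBR]
    by_cases hj0 : j = 0
    · subst hj0; simp
    · rw [hLV hj0]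
      simp only [List.all_nil, Bool.or_true, if_pos rfl]
      split_ifs <;> omega
  · by_cases hj0 : j = 0
    · -- first index: left flag 0 and B's left scan range empty
      have hBL : PySem.List.pyRange 0 ((j:Int)) 1 = [] := by
        subst hj0; exact PySem.List.pyRange_one_eq_nil (by omega)
      unfold aBad bGood
      rw [hRV (by omega), hBL]
      subst hj0
      simp only [List.getD_cons_zero, List.all_nil, Bool.true_or, if_pos rfl]
      split_ifs <;> omega
    · -- middle index
      have hLb := allL_iff arr j (by omega) (by omega)
      have hRb := allR_iff arr j (by omega)
      unfold aBad bGood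
      rw [hLV hj0, hRV (by omega)]
      simp only [Bool.or_eq_true, hLb, hRb]
      split_ifs <;> first | omega | (exfalso; tauto)

-- ===== VERDICT (by name: the statement is the Claim_ definition above) =====
theorem solution_spec : Claim_equal_solution := by
  unfold Claim_equal_solution
  intro arr _ hpre
  unfold Spec_solution
  have hN : 1 ≤ arr.length := List.length_pos_iff.mpr hpre
  -- the initial all-zero flag arrays
  have hzeros : (PySem.List.pyRange 0 (arr.length : Int) 1).map (fun _ => (0:Int))
      = List.replicate arr.length 0 := by
    rw [PySem.List.pyRange_zero_natCast, List.map_map]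
    rw [show ((fun (_ : Int) => (0:Int)) ∘ (fun (k : Nat) => (k:Int))) = fun (_ : Nat) => (0:Int)
      from rfl]
    rw [List.map_const', List.length_range]
  have h3 : PySem.List.pyGetD arr ((arr.length : Int) - 1) 0 = arr.getD (arr.length - 1) 0 := by
    rw [show (arr.length : Int) - 1 = ((arr.length - 1 : Nat) : Int) from by omega,
      PySem.List.pyGetD_natCast]
  -- the value A's three loops compute: N minus the sum of the per-index both-fail indicators
  have hA : solution arr = (arr.length : Int)
      - ((List.range arr.length).map (fun j => aBad arr j)).sum := by
    simp only [solution]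
    rw [hzeros, show PySem.List.pyGetD arr 0 0 = arr.getD 0 0 from PySem.List.pyGetD_zero arr 0, h3]
    -- left loop
    have hrepL : List.replicate arr.length (0:Int)
        = [(0:Int)] ++ List.replicate (arr.drop 1).length 0 := by
      rw [List.length_drop, List.singleton_append, ← List.replicate_succ]
      congr 1; omega
    have hL := leftLoop arr (arr.drop 1) 1 (arr.getD 0 0) [(0:Int)] rfl rfl
    rw [Nat.cast_one, ← hrepL] at hL
    rw [hL]
    -- right loop
    have hrepR : List.replicate arr.length (0:Int)
        = List.replicate (arr.length - 1) 0 ++ [(0:Int)] := by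
      rw [← List.replicate_succ']
      congr 1; omega
    have h2 : ((arr.length - 1 : Nat) : Int) - 1 = (arr.length : Int) - 2 := by omega
    have hR := rightLoop arr (arr.length - 1) (arr.getD (arr.length - 1) 0) [(0:Int)] (by omega)
    rw [h2, ← hrepR] at hR
    rw [hR]
    -- third loop
    rw [PySem.List.pyRange_zero_natCast, List.foldl_map]
    rw [fold_sub (fun j : Nat =>
      PySem.List.pyGetD ([(0:Int)] ++ flagsL (arr.getD 0 0) (arr.drop 1)) (j : Int) 0
        + PySem.List.pyGetD ((flagsL (arr.getD (arr.length - 1) 0)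
            ((arr.take (arr.length - 1)).reverse)).reverse ++ [(0:Int)]) (j : Int) 0 = 2)]
    simp only [PySem.List.pyGetD_natCast, List.singleton_append]
    rfl
  -- the value B's count computes: the sum of the per-index survivor indicators
  have hB : solution_alt arr = ((List.range arr.length).map (fun j => bGood arr j)).sum := by
    simp only [solution_alt]
    rw [PySem.List.pyRange_zero_natCast, List.countP_map, ← PySem.List.sum_map_ite_one_zero]
    rfl
  rw [hA, hB]
  -- the two per-index contributions are complementary
  have hsum : ((List.range arr.length).map (fun j => aBad arr j)).sum
      + ((List.range arr.length).map (fun j => bGood arr j)).sum = (arr.length : Int) := by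
    rw [← List.sum_map_add]
    rw [List.map_congr_left (fun j hj => pointwise arr hpre j (List.mem_range.mp hj))]
    simp [List.map_const', List.sum_replicate]
  omega
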